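-- pv_equiv track=rewrite | github.com/mortyc126-debug/SHA-256 | research/qt_minimal/anf_early_verify.py | carry_chain_partial
-- ===== SOURCE A (Python) =====
-- def carry_chain_partial(x_add, K, L, positions):
--     """Compute only carry bits at specified positions (in order).
--     Cost: O(max(positions)) — still walks carry chain to highest position."""
--     if not positions:
--         return 0
--     max_pos = max(positions)
--     out = 0
--     carry = 0
--     for i in range(max_pos + 1):
--         a = (x_add >> i) & 1
--         b = (K >> i) & 1
--         if i in positions:
--             out |= (carry << i)
--         carry = (a & b) | (a & carry) | (b & carry)
--     return out
-- ===== SOURCE B (Python) =====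
-- def carry_chain_partial(x_add, K, L, positions):
--     """Closed form per position: the carry into bit p of x_add + K is
--     ((x_add % 2**p) + (K % 2**p)) >> p.  No walk of the carry chain."""
--     out = 0
--     for p in positions:
--         if p >= 0:
--             m = 1 << p
--             if (x_add % m + K % m) >> p:
--                 out |= m
--     return out
-- ===== Notes on version B (the rewrite author's own statement) =====
-- stated objective: faster
-- what changed: Replaces A's bit-by-bit walk of the whole carry chain up to max(positions) with a per-position closed form: the carry into bit p of x_add+K is ((x_add % 2**p) + (K % 2**p)) >> p, so B does one O(1) big-int expression per listed position and never loops to the maximum.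
import Mathlib
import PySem

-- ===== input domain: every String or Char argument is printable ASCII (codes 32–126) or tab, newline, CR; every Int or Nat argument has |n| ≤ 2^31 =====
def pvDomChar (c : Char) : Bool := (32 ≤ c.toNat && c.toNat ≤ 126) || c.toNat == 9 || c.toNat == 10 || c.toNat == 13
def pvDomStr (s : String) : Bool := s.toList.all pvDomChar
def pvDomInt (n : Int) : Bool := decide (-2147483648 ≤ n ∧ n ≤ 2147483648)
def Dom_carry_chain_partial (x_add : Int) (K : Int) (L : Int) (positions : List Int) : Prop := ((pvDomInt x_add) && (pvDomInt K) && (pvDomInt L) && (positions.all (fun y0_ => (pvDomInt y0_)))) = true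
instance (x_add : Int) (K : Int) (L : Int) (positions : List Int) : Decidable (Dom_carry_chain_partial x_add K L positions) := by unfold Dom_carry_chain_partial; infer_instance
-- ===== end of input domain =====

-- B replaces A's walk of the whole carry chain up to max(positions) by a per-position
-- closed form ((x % 2^p) + (K % 2^p)) >> p, one O(1) big-int expression per listed position.

-- ===== PORT A =====
-- loop body of A: out is updated with the OLD carry, then carry becomes the majority
def aStep (x_add : Int) (K : Int) (positions : List Int) (s : Int × Int) (i : Int) : Int × Int :=
  let a := PySem.Int.band (x_add >>> i.toNat) 1
  let b := PySem.Int.band (K >>> i.toNat) 1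
  let out := if positions.contains i then PySem.Int.bor s.1 (s.2 <<< i.toNat) else s.1
  let carry := PySem.Int.bor (PySem.Int.bor (PySem.Int.band a b) (PySem.Int.band a s.2)) (PySem.Int.band b s.2)
  (out, carry)

def carry_chain_partial (x_add : Int) (K : Int) (L : Int) (positions : List Int) : Int :=
  if positions = [] then 0
  else
    let max_pos := (PySem.List.max? positions (fun y => y)).getD 0
    ((PySem.List.pyRange 0 (max_pos + 1) 1).foldl (aStep x_add K positions) (0, 0)).1

-- ===== PORT B =====
-- loop body of B: set bit p iff p >= 0 and the closed-form carry at p is non-zero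
def bStep (x_add : Int) (K : Int) (out : Int) (p : Int) : Int :=
  if p ≥ 0 then
    let m := (1 : Int) <<< p.toNat
    if (PySem.Int.mod x_add m + PySem.Int.mod K m) >>> p.toNat ≠ 0 then PySem.Int.bor out m
    else out
  else out

def carry_chain_partial_alt (x_add : Int) (K : Int) (L : Int) (positions : List Int) : Int :=
  positions.foldl (bStep x_add K) 0

-- ===== PRECONDITION & SPEC =====
def Spec_carry_chain_partial (x_add : Int) (K : Int) (L : Int) (positions : List Int) (out : Int) : Prop := out = carry_chain_partial_alt x_add K L positions
instance (x_add : Int) (K : Int) (L : Int) (positions : List Int) (out : Int) : Decidable (Spec_carry_chain_partial x_add K L positions out) := by unfold Spec_carry_chain_partial; infer_instance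

-- ===== CLAIM (what is proved, stated in full; the proofs are below) =====
def Claim_equal_carry_chain_partial : Prop := ∀ (x_add : Int) (K : Int) (L : Int) (positions : List Int), Dom_carry_chain_partial x_add K L positions → Spec_carry_chain_partial x_add K L positions (carry_chain_partial x_add K L positions)

-- ===== LEMMAS AND PROOFS =====

-- the carry into bit n of x + K, in closed form
def cbit (x K : Int) (n : Nat) : Int := (x % 2 ^ n + K % 2 ^ n) / 2 ^ n

lemma cbit_zero (x K : Int) : cbit x K 0 = 0 := by simp [cbit]

lemma cbit_zero_or_one (x K : Int) (n : Nat) : cbit x K n = 0 ∨ cbit x K n = 1 := by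
  have hp : (0 : Int) < 2 ^ n := by positivity
  have hx1 := Int.emod_nonneg x (ne_of_gt hp)
  have hx2 := Int.emod_lt_of_pos x hp
  have hK1 := Int.emod_nonneg K (ne_of_gt hp)
  have hK2 := Int.emod_lt_of_pos K hp
  have h1 : 0 ≤ cbit x K n := Int.ediv_nonneg (by omega) (le_of_lt hp)
  have h2 : cbit x K n < 2 := by
    rw [cbit, Int.ediv_lt_iff_lt_mul hp]; omega
  omega

lemma emod_two_pow_succ (x : Int) (n : Nat) :
    x % 2 ^ (n + 1) = x % 2 ^ n + 2 ^ n * ((x / 2 ^ n) % 2) := by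
  have hp : (0 : Int) < 2 ^ n := by positivity
  have hsucc : (2 : Int) ^ (n + 1) = 2 * 2 ^ n := by ring
  have h1 := Int.ediv_add_emod x (2 ^ n)
  have h3 := Int.ediv_add_emod (x / 2 ^ n) 2
  have hr1 := Int.emod_nonneg x (ne_of_gt hp)
  have hr2 := Int.emod_lt_of_pos x hp
  have ha1 := Int.emod_nonneg (x / 2 ^ n) (two_ne_zero)
  have ha2 := Int.emod_lt_of_pos (x / 2 ^ n) (b := 2) (by norm_num)
  set a := (x / 2 ^ n) % 2 with hadef
  set r := x % 2 ^ n with hrdef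
  set q2 := x / 2 ^ n / 2 with hq2
  have hx : x = (r + 2 ^ n * a) + 2 ^ (n + 1) * q2 := by
    rw [hsucc]; nlinarith [h1, h3]
  calc x % 2 ^ (n + 1) = ((r + 2 ^ n * a) + 2 ^ (n + 1) * q2) % 2 ^ (n + 1) := by rw [← hx]
    _ = (r + 2 ^ n * a) % 2 ^ (n + 1) := by rw [Int.add_mul_emod_self_left]
    _ = r + 2 ^ n * a := Int.emod_eq_of_lt (by nlinarith) (by nlinarith)

lemma cbit_succ (x K : Int) (n : Nat) :
    cbit x K (n + 1) = (if 2 ≤ (x / 2 ^ n) % 2 + (K / 2 ^ n) % 2 + cbit x K n then 1 else 0) := by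
  have hp : (0 : Int) < 2 ^ n := by positivity
  have hsucc : (2 : Int) ^ (n + 1) = 2 * 2 ^ n := by ring
  have hx1 := Int.emod_nonneg x (ne_of_gt hp)
  have hx2 := Int.emod_lt_of_pos x hp
  have hK1 := Int.emod_nonneg K (ne_of_gt hp)
  have hK2 := Int.emod_lt_of_pos K hp
  have ha1 := Int.emod_nonneg (x / 2 ^ n) (two_ne_zero)
  have ha2 := Int.emod_lt_of_pos (x / 2 ^ n) (b := 2) (by norm_num)
  have hb1 := Int.emod_nonneg (K / 2 ^ n) (two_ne_zero)
  have hb2 := Int.emod_lt_of_pos (K / 2 ^ n) (b := 2) (by norm_num)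
  set a := (x / 2 ^ n) % 2
  set b := (K / 2 ^ n) % 2
  set s := x % 2 ^ n + K % 2 ^ n with hs
  have hc := Int.ediv_add_emod s (2 ^ n)
  have ht1 := Int.emod_nonneg s (ne_of_gt hp)
  have ht2 := Int.emod_lt_of_pos s hp
  set t := s % 2 ^ n
  have hcv : cbit x K n = s / 2 ^ n := rfl
  have hcval := cbit_zero_or_one x K n
  set c := cbit x K n with hcdef
  set q : Int := if 2 ≤ a + b + c then 1 else 0 with hq
  have hq01 : q = 0 ∨ q = 1 := by rw [hq]; split <;> simp
  have hN : x % 2 ^ (n + 1) + K % 2 ^ (n + 1)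
      = (2 ^ n * (a + b + c - 2 * q) + t) + 2 ^ (n + 1) * q := by
    rw [emod_two_pow_succ x n, emod_two_pow_succ K n, hsucc]
    rw [hcv] at hcdef
    nlinarith [hc]
  have hcb : 0 ≤ c ∧ c ≤ 1 := by rcases hcval with h | h <;> simp [h]
  have hrem0 : 0 ≤ 2 ^ n * (a + b + c - 2 * q) + t := by
    by_cases hcond : 2 ≤ a + b + c
    · rw [if_pos hcond] at hq; nlinarith
    · rw [if_neg hcond] at hq; nlinarith
  have hremlt : 2 ^ n * (a + b + c - 2 * q) + t < 2 ^ (n + 1) := by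
    rw [hsucc]
    by_cases hcond : 2 ≤ a + b + c
    · rw [if_pos hcond] at hq; nlinarith
    · rw [if_neg hcond] at hq; nlinarith
  have : cbit x K (n + 1) = ((2 ^ n * (a + b + c - 2 * q) + t) + 2 ^ (n + 1) * q) / 2 ^ (n + 1) := by
    rw [cbit, hN]
  rw [this, Int.add_mul_ediv_left _ q (by positivity : ((2:Int) ^ (n+1)) ≠ 0),
      Int.ediv_eq_zero_of_lt hrem0 hremlt, zero_add, hq]

-- A's majority update, fed the closed-form carry, produces the next closed-form carry
lemma aStep_carry (x K : Int) (n : Nat) :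
    PySem.Int.bor (PySem.Int.bor
        (PySem.Int.band (PySem.Int.band (x >>> n) 1) (PySem.Int.band (K >>> n) 1))
        (PySem.Int.band (PySem.Int.band (x >>> n) 1) (cbit x K n)))
      (PySem.Int.band (PySem.Int.band (K >>> n) 1) (cbit x K n)) = cbit x K (n + 1) := by
  have ha : PySem.Int.band (x >>> n) 1 = (x / 2 ^ n) % 2 := by
    rw [PySem.Int.band_one, PySem.Int.mod_eq_emod_of_pos (by norm_num), Int.shiftRight_eq_div_pow]
    norm_cast
  have hb : PySem.Int.band (K >>> n) 1 = (K / 2 ^ n) % 2 := by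
    rw [PySem.Int.band_one, PySem.Int.mod_eq_emod_of_pos (by norm_num), Int.shiftRight_eq_div_pow]
    norm_cast
  have ha2 : (x / 2 ^ n) % 2 = 0 ∨ (x / 2 ^ n) % 2 = 1 := Int.emod_two_eq_zero_or_one _
  have hb2 : (K / 2 ^ n) % 2 = 0 ∨ (K / 2 ^ n) % 2 = 1 := Int.emod_two_eq_zero_or_one _
  have hc2 := cbit_zero_or_one x K n
  rw [cbit_succ, ha, hb]
  rcases ha2 with h1 | h1 <;> rcases hb2 with h2 | h2 <;> rcases hc2 with h3 | h3 <;>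
    rw [h1, h2, h3] <;> decide

-- the closed-form test in B's body is exactly "cbit = 1"
lemma bStep_cond (x K : Int) (n : Nat) :
    (PySem.Int.mod x ((1 : Int) <<< n) + PySem.Int.mod K ((1 : Int) <<< n)) >>> n = cbit x K n := by
  have hm : ((1 : Int) <<< n) = 2 ^ n := by rw [Int.shiftLeft_eq, one_mul]
  rw [hm, PySem.Int.mod_eq_emod_of_pos (by positivity), PySem.Int.mod_eq_emod_of_pos (by positivity),
    Int.shiftRight_eq_div_pow, cbit]
  norm_cast

-- invariant of B's fold: the accumulated bits
lemma bFold (x K : Int) (l : List Int) (acc : Int) (hacc : 0 ≤ acc) :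
    0 ≤ l.foldl (bStep x K) acc ∧
    ∀ j : Nat, ((l.foldl (bStep x K) acc).toNat.testBit j = true ↔
      (acc.toNat.testBit j = true ∨ ((j : Int) ∈ l ∧ cbit x K j = 1))) := by
  induction l generalizing acc with
  | nil => simp [hacc]
  | cons p t ih =>
    have hm : ((1 : Int) <<< p.toNat) = 2 ^ p.toNat := by rw [Int.shiftLeft_eq, one_mul]
    by_cases hp : p ≥ 0
    · by_cases hcond : (PySem.Int.mod x ((1 : Int) <<< p.toNat) + PySem.Int.mod K ((1 : Int) <<< p.toNat)) >>> p.toNat ≠ 0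
      · -- bit p.toNat is set
        have hc1 : cbit x K p.toNat = 1 := by
          rcases cbit_zero_or_one x K p.toNat with h | h
          · exact absurd (bStep_cond x K p.toNat ▸ h) hcond
          · exact h
        have hcond' : (PySem.Int.mod x (2 ^ p.toNat) + PySem.Int.mod K (2 ^ p.toNat)) >>> p.toNat ≠ 0 := by
          rw [← hm]; exact hcond
        have hstep : bStep x K acc p = PySem.Int.bor acc (2 ^ p.toNat) := by
          simp only [bStep, if_pos hp, hm, if_pos hcond']
        have hbor : PySem.Int.bor acc (2 ^ p.toNat)
            = ((acc.toNat ||| 2 ^ p.toNat : Nat) : Int) := by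
          have := PySem.Int.bor_of_nonneg hacc (by positivity : (0:Int) ≤ 2 ^ p.toNat)
          simpa using this
        have hnn : 0 ≤ bStep x K acc p := by
          rw [hstep, hbor]; exact Int.natCast_nonneg _
        obtain ⟨ihn, ihb⟩ := ih (bStep x K acc p) hnn
        refine ⟨by simpa [List.foldl_cons] using ihn, fun j => ?_⟩
        rw [List.foldl_cons, ihb j, hstep, hbor]
        rw [Int.toNat_natCast, Nat.testBit_lor, Nat.testBit_two_pow]
        constructor
        · rintro (h | h)
          · rcases Bool.or_eq_true_iff.mp h with h' | h'
            · exact Or.inl h'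
            · refine Or.inr ⟨?_, ?_⟩
              · have : p.toNat = j := of_decide_eq_true h'
                have : p = (j : Int) := by omega
                simp [this]
              · have hpj : p.toNat = j := of_decide_eq_true h'
                rw [← hpj]; exact hc1
          · exact Or.inr ⟨List.mem_cons_of_mem _ h.1, h.2⟩
        · rintro (h | ⟨hmem, hcb⟩)
          · exact Or.inl (Bool.or_eq_true_iff.mpr (Or.inl h))
          · rcases List.mem_cons.mp hmem with h' | h'
            · refine Or.inl (Bool.or_eq_true_iff.mpr (Or.inr ?_))
              have : p.toNat = j := by omega
              simp [this]
            · exact Or.inr ⟨h', hcb⟩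
      · -- carry at p is zero: nothing added
        have hc0 : cbit x K p.toNat = 0 := by
          rcases cbit_zero_or_one x K p.toNat with h | h
          · exact h
          · exact absurd (by rw [bStep_cond, h]; norm_num) hcond
        have hcond' : ¬ (PySem.Int.mod x (2 ^ p.toNat) + PySem.Int.mod K (2 ^ p.toNat)) >>> p.toNat ≠ 0 := by
          rw [← hm]; exact hcond
        have hstep : bStep x K acc p = acc := by
          simp only [bStep, if_pos hp, hm, if_neg hcond']
        obtain ⟨ihn, ihb⟩ := ih (bStep x K acc p) (by rw [hstep]; exact hacc)
        refine ⟨by simpa [List.foldl_cons] using ihn, fun j => ?_⟩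
        rw [List.foldl_cons, ihb j, hstep]
        constructor
        · rintro (h | h)
          · exact Or.inl h
          · exact Or.inr ⟨List.mem_cons_of_mem _ h.1, h.2⟩
        · rintro (h | ⟨hmem, hcb⟩)
          · exact Or.inl h
          · rcases List.mem_cons.mp hmem with h' | h'
            · exfalso
              have : p.toNat = j := by omega
              rw [← this, hc0] at hcb; exact absurd hcb (by norm_num)
            · exact Or.inr ⟨h', hcb⟩
    · -- negative position: skipped
      have hstep : bStep x K acc p = acc := by simp only [bStep, if_neg hp]
      obtain ⟨ihn, ihb⟩ := ih (bStep x K acc p) (by rw [hstep]; exact hacc)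
      refine ⟨by simpa [List.foldl_cons] using ihn, fun j => ?_⟩
      rw [List.foldl_cons, ihb j, hstep]
      constructor
      · rintro (h | h)
        · exact Or.inl h
        · exact Or.inr ⟨List.mem_cons_of_mem _ h.1, h.2⟩
      · rintro (h | ⟨hmem, hcb⟩)
        · exact Or.inl h
        · rcases List.mem_cons.mp hmem with h' | h'
          · exfalso; omega
          · exact Or.inr ⟨h', hcb⟩

-- invariant of A's loop over range n: carry is the closed-form carry, out holds the bits below n
lemma aFold (x K : Int) (positions : List Int) (n : Nat) :
    ((List.range n).foldl (fun s (k : Nat) => aStep x K positions s (k : Int)) (0, 0)).2 = cbit x K n ∧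
    0 ≤ ((List.range n).foldl (fun s (k : Nat) => aStep x K positions s (k : Int)) (0, 0)).1 ∧
    ((List.range n).foldl (fun s (k : Nat) => aStep x K positions s (k : Int)) (0, 0)).1 < 2 ^ n ∧
    ∀ j : Nat, (((List.range n).foldl (fun s (k : Nat) => aStep x K positions s (k : Int)) (0, 0)).1.toNat.testBit j = true ↔
      (j < n ∧ (j : Int) ∈ positions ∧ cbit x K j = 1)) := by
  induction n with
  | zero => simp [cbit_zero]
  | succ n ih =>
    obtain ⟨ihc, ihn, ihlt, ihb⟩ := ih
    rw [List.range_succ, List.foldl_append, List.foldl_cons, List.foldl_nil]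
    set s := (List.range n).foldl (fun s (k : Nat) => aStep x K positions s (k : Int)) (0, 0) with hs
    have htn : ((n : Int)).toNat = n := Int.toNat_natCast n
    have hcarry : (aStep x K positions s (n : Int)).2 = cbit x K (n + 1) := by
      simp only [aStep, htn]
      rw [ihc]; exact aStep_carry x K n
    have hshift : cbit x K n <<< n = cbit x K n * 2 ^ n := by rw [Int.shiftLeft_eq]
    have hout : (aStep x K positions s (n : Int)).1
        = if positions.contains (n : Int) then PySem.Int.bor s.1 (cbit x K n <<< n) else s.1 := by
      simp only [aStep, htn, ihc]
    by_cases hmem : (n : Int) ∈ positions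
    · rcases cbit_zero_or_one x K n with hc | hc
      · -- carry 0: bit not set
        have : (aStep x K positions s (n : Int)).1 = s.1 := by
          rw [hout, if_pos (List.elem_eq_true_of_mem hmem), hc]
          simp [Int.zero_shiftLeft]
        rw [this]
        refine ⟨hcarry, ihn, lt_of_lt_of_le ihlt (pow_le_pow_right₀ (by norm_num) (Nat.le_succ n)), fun j => ?_⟩
        rw [ihb j]
        constructor
        · rintro ⟨h1, h2, h3⟩; exact ⟨by omega, h2, h3⟩
        · rintro ⟨h1, h2, h3⟩
          rcases Nat.lt_succ_iff_lt_or_eq.mp h1 with h' | h'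
          · exact ⟨h', h2, h3⟩
          · exfalso; rw [h', hc] at h3; exact absurd h3 (by norm_num)
      · -- carry 1: bit n set
        have hone : cbit x K n <<< n = 2 ^ n := by rw [hshift, hc, one_mul]
        have hbor : PySem.Int.bor s.1 (2 ^ n) = ((s.1.toNat ||| 2 ^ n : Nat) : Int) := by
          have := PySem.Int.bor_of_nonneg ihn (by positivity : (0:Int) ≤ 2 ^ n)
          simpa using this
        have hv : (aStep x K positions s (n : Int)).1 = ((s.1.toNat ||| 2 ^ n : Nat) : Int) := by
          rw [hout, if_pos (List.elem_eq_true_of_mem hmem), hone, hbor]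
        rw [hv]
        have hlt1 : s.1.toNat < 2 ^ n := by
          have h' : ((s.1.toNat : Int)) < 2 ^ n := by rw [Int.toNat_of_nonneg ihn]; exact ihlt
          exact_mod_cast h'
        have hltor : (s.1.toNat ||| 2 ^ n) < 2 ^ (n + 1) := by
          apply Nat.bitwise_lt_two_pow
          · calc s.1.toNat < 2 ^ n := hlt1
              _ ≤ 2 ^ (n + 1) := Nat.pow_le_pow_right (by norm_num) (Nat.le_succ n)
          · rw [Nat.pow_succ]; omega
        refine ⟨hcarry, Int.natCast_nonneg _, by exact_mod_cast hltor, fun j => ?_⟩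
        rw [Int.toNat_natCast, Nat.testBit_lor, Nat.testBit_two_pow]
        constructor
        · intro h
          rcases Bool.or_eq_true_iff.mp h with h' | h'
          · obtain ⟨h1, h2, h3⟩ := (ihb j).mp h'
            exact ⟨by omega, h2, h3⟩
          · have hnj : n = j := of_decide_eq_true h'
            exact ⟨by omega, hnj ▸ hmem, hnj ▸ hc⟩
        · rintro ⟨h1, h2, h3⟩
          rcases Nat.lt_succ_iff_lt_or_eq.mp h1 with h' | h'
          · exact Bool.or_eq_true_iff.mpr (Or.inl ((ihb j).mpr ⟨h', h2, h3⟩))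
          · exact Bool.or_eq_true_iff.mpr (Or.inr (by simp [h']))
    · -- n not listed: out unchanged
      have : (aStep x K positions s (n : Int)).1 = s.1 := by
        rw [hout, if_neg (by simpa using hmem)]
      rw [this]
      refine ⟨hcarry, ihn, lt_of_lt_of_le ihlt (pow_le_pow_right₀ (by norm_num) (Nat.le_succ n)), fun j => ?_⟩
      rw [ihb j]
      constructor
      · rintro ⟨h1, h2, h3⟩; exact ⟨by omega, h2, h3⟩
      · rintro ⟨h1, h2, h3⟩
        rcases Nat.lt_succ_iff_lt_or_eq.mp h1 with h' | h'
        · exact ⟨h', h2, h3⟩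
        · exact absurd (h' ▸ h2) hmem

-- ===== VERDICT (by name: the statement is the Claim_ definition above) =====
theorem carry_chain_partial_spec : Claim_equal_carry_chain_partial := by
  intro x K L positions _hdom
  unfold Spec_carry_chain_partial carry_chain_partial carry_chain_partial_alt
  by_cases hnil : positions = []
  · subst hnil; simp
  · rw [if_neg hnil]
    obtain ⟨h, t, rfl⟩ : ∃ h t, positions = h :: t := by
      cases positions with
      | nil => exact absurd rfl hnil
      | cons h t => exact ⟨h, t, rfl⟩
    rw [PySem.List.max?_id_cons, Option.getD_some]
    set M := t.foldl max h with hM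
    show (((PySem.List.pyRange 0 (M + 1) 1).foldl (aStep x K (h :: t)) (0, 0)).1 : Int)
        = (h :: t).foldl (bStep x K) 0
    have hmax : ∀ y ∈ h :: t, y ≤ M :=
      PySem.List.max?_isMax (by rw [PySem.List.max?_id_cons])
    set n := (M + 1 - 0).toNat with hn
    have hrange : PySem.List.pyRange 0 (M + 1) 1
        = (List.range n).map (fun k : Nat => ((0 : Int) + k)) := by
      rw [PySem.List.pyRange_one]
    rw [hrange, List.foldl_map]
    simp only [zero_add]
    obtain ⟨_, hAnn, _, hAb⟩ := aFold x K (h :: t) n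
    obtain ⟨hBnn, hBb⟩ := bFold x K (h :: t) 0 le_rfl
    set A := ((List.range n).foldl (fun s (k : Nat) => aStep x K (h :: t) s (k : Int)) (0, 0)).1
    set B := (h :: t).foldl (bStep x K) 0
    have : A.toNat = B.toNat := by
      apply Nat.eq_of_testBit_eq
      intro j
      have hiff : (A.toNat.testBit j = true ↔ B.toNat.testBit j = true) := by
        rw [hAb j, hBb j]
        constructor
        · rintro ⟨_, h2, h3⟩; exact Or.inr ⟨h2, h3⟩
        · rintro (habs | ⟨h2, h3⟩)
          · simp at habs
          · refine ⟨?_, h2, h3⟩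
            have := hmax _ h2
            omega
      exact Bool.eq_iff_iff.mpr hiff
    omega
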